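-- pv_equiv track=rewrite | github.com/whydrmr/bank_application | bank/identification.py | decrypter
-- ===== SOURCE A (Python) =====
-- def decrypter(a_decrypter, cle):
--     """str x int -> str
--     decrypter l'id et le mdp de l'identifiant avec la clé (clé cesar)
--     """
--     result = ""
--     cle = int(cle)    # Si c un nombre (id)
--     if a_decrypter.isdigit():  # on va traiter que des str ducoup c'est une methode pour verifier que c bien des chiffres
--         for elem in a_decrypter:
--             result += chr((ord(elem) - ord('0') + cle) % 10 + ord('0'))
--         return result
--
--     # sinon c du texte (mdp)
--     else:
--         for elem in a_decrypter.lower():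
--             if 'a' <= elem <= 'z':
--                 result += chr((ord(elem) - ord('a') + cle) % 26 + ord('a'))
--         return result.capitalize()
-- ===== SOURCE B (Python) =====
-- def decrypter(a_decrypter, cle):
--     """str x int -> str
--     Caesar decrypt: build a translation table from the input's own characters,
--     then translate in one call instead of accumulating char by char.
--     """
--     cle = int(cle)
--     if a_decrypter.isdigit():
--         table = {ord(c): chr((ord(c) - 48 + cle) % 10 + 48) for c in a_decrypter}
--         return a_decrypter.translate(table)
--     s = a_decrypter.lower()
--     table = {ord(c): (chr((ord(c) - 97 + cle) % 26 + 97) if 'a' <= c <= 'z' else None)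
--              for c in s}
--     return s.translate(table).capitalize()
-- ===== Notes on version B (the rewrite author's own statement) =====
-- stated objective: idiomatic
-- what changed: Replaces the per-character string-accumulation loops with a translation table (dict keyed by codepoint, built from the input's own characters, None for deletion) applied via str.translate.
import Mathlib
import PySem

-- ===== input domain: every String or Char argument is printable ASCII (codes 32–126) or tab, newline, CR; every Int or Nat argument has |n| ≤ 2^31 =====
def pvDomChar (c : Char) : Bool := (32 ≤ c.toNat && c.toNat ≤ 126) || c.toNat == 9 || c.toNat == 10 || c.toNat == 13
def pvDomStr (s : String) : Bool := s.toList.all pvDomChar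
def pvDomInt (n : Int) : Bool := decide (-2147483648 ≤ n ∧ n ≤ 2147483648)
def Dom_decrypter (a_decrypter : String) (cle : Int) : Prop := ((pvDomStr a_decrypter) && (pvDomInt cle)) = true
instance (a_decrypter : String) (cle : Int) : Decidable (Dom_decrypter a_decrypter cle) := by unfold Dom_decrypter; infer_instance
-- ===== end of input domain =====

-- B replaces A's per-character accumulation loops by a codepoint-keyed translation table
-- (built from the input's own characters, none = deletion) applied in one translate pass.

-- s.capitalize(): first char uppercased, rest lowered — exact on ASCII (shared Python builtin)
def pyCapitalize : List Char → List Char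
  | [] => []
  | c :: t => PySem.Chars.upperChar c :: t.map PySem.Chars.lowerChar

-- ===== PORT A =====
def decrypter (a_decrypter : String) (cle : Int) : String :=
  if PySem.Str.strIsdigit a_decrypter then
    String.mk (a_decrypter.toList.foldl
      (fun r e => r ++ [Char.ofNat ((PySem.Int.mod ((e.toNat : Int) - 48 + cle) 10 + 48).toNat)]) [])
  else
    String.mk (pyCapitalize ((PySem.Str.lower a_decrypter).toList.foldl
      (fun r e => if 'a' ≤ e ∧ e ≤ 'z'
        then r ++ [Char.ofNat ((PySem.Int.mod ((e.toNat : Int) - 97 + cle) 26 + 97).toNat)]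
        else r) []))

-- ===== PORT B =====
-- s.translate(table): keep a char whose codepoint is not a key, delete on value none, else replace
def pyTranslate (cs : List Char) (table : PySem.Dict Nat (Option Char)) : List Char :=
  cs.foldl (fun out c =>
    match table.get? c.toNat with
    | none => out ++ [c]
    | some none => out
    | some (some r) => out ++ [r]) []

def decrypter_alt (a_decrypter : String) (cle : Int) : String :=
  if PySem.Str.strIsdigit a_decrypter then
    let table : PySem.Dict Nat (Option Char) := a_decrypter.toList.foldl
      (fun d c => d.insert c.toNat (some (Char.ofNat ((PySem.Int.mod ((c.toNat : Int) - 48 + cle) 10 + 48).toNat)))) PySem.Dict.empty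
    String.mk (pyTranslate a_decrypter.toList table)
  else
    let s := (PySem.Str.lower a_decrypter).toList
    let table : PySem.Dict Nat (Option Char) := s.foldl
      (fun d c => d.insert c.toNat
        (if 'a' ≤ c ∧ c ≤ 'z'
          then some (Char.ofNat ((PySem.Int.mod ((c.toNat : Int) - 97 + cle) 26 + 97).toNat))
          else none)) PySem.Dict.empty
    String.mk (pyCapitalize (pyTranslate s table))

-- ===== PRECONDITION & SPEC =====
def Spec_decrypter (a_decrypter : String) (cle : Int) (out : String) : Prop := out = decrypter_alt a_decrypter cle
instance (a_decrypter : String) (cle : Int) (out : String) : Decidable (Spec_decrypter a_decrypter cle out) := by unfold Spec_decrypter; infer_instance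

-- ===== CLAIM (what is proved, stated in full; the proofs are below) =====
def Claim_equal_decrypter : Prop := ∀ (a_decrypter : String) (cle : Int), Dom_decrypter a_decrypter cle → Spec_decrypter a_decrypter cle (decrypter a_decrypter cle)

-- ===== LEMMAS AND PROOFS =====

-- a fold of inserts never touches a key no character of the list maps to
theorem get?_build_not_mem (l : List Char) (g : Char → Option Char)
    (d : PySem.Dict Nat (Option Char)) (k : Nat) (h : ∀ x ∈ l, x.toNat ≠ k) :
    (l.foldl (fun d c => d.insert c.toNat (g c)) d).get? k = d.get? k := by
  induction l generalizing d with
  | nil => rfl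
  | cons x t ih =>
    simp only [List.foldl_cons]
    rw [ih _ (fun y hy => h y (List.mem_cons_of_mem _ hy)),
      PySem.Dict.get?_insert_of_ne _ _ (fun he => h x (List.mem_cons_self) he.symm)]

-- looking up the codepoint of any character of the list in the table built from it gives its value
theorem get?_build_mem (l : List Char) (g : Char → Option Char)
    (d : PySem.Dict Nat (Option Char)) (c : Char) (h : c ∈ l) :
    (l.foldl (fun d c => d.insert c.toNat (g c)) d).get? c.toNat = some (g c) := by
  induction l generalizing d with
  | nil => cases h
  | cons x t ih =>
    simp only [List.foldl_cons]
    by_cases hc : c ∈ t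
    · exact ih _ hc
    · have hx : c = x := by
        rcases List.mem_cons.1 h with h' | h'
        · exact h'
        · exact absurd h' hc
      subst hx
      rw [get?_build_not_mem t g _ _ (fun y hy he =>
        hc (by rwa [Char.ext (UInt32.toNat_inj.mp he)] at hy))]
      exact PySem.Dict.get?_insert_self _ _ _

-- translating a list through the table built from that same list applies g pointwise
theorem translate_build (l : List Char) (g : Char → Option Char) :
    pyTranslate l (l.foldl (fun d c => d.insert c.toNat (g c)) PySem.Dict.empty)
      = l.flatMap (fun c => match g c with | none => [] | some r => [r]) := by
  unfold pyTranslate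
  have h1 := PySem.List.foldl_congr_mem (l := l) (init := ([] : List Char))
      (f := fun out c =>
        match (l.foldl (fun d c => d.insert c.toNat (g c)) PySem.Dict.empty).get? c.toNat with
        | none => out ++ [c] | some none => out | some (some r) => out ++ [r])
      (g := fun out c => out ++ (match g c with | none => [] | some r => [r]))
      (by intro acc x hx
          simp only [get?_build_mem l g PySem.Dict.empty x hx]
          cases g x <;> simp)
  rw [h1]
  simpa using PySem.List.foldl_append_eq_flatMap
      (fun c => match g c with | none => [] | some r => [r]) l []

theorem flatMap_ite (l : List Char) (p : Char → Prop) [DecidablePred p] (f : Char → Char) :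
    (l.flatMap (fun c => if p c then [f c] else [])) = (l.filter (fun c => decide (p c))).map f := by
  induction l with
  | nil => rfl
  | cons x t ih => by_cases h : p x <;> simp [List.flatMap_cons, h, ih]

-- ===== VERDICT (by name: the statement is the Claim_ definition above) =====
theorem decrypter_spec : Claim_equal_decrypter := by
  intro a cle _
  unfold Spec_decrypter decrypter decrypter_alt
  by_cases hd : PySem.Str.strIsdigit a
  · rw [if_pos hd, if_pos hd]
    refine congrArg String.mk ?_
    rw [translate_build a.toList
      (fun c => some (Char.ofNat ((PySem.Int.mod ((c.toNat : Int) - 48 + cle) 10 + 48).toNat)))]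
    rw [PySem.List.foldl_append_singleton_eq_map, ← List.map_eq_flatMap, List.nil_append]
  · rw [if_neg hd, if_neg hd]
    refine congrArg (fun l => String.mk (pyCapitalize l)) ?_
    rw [translate_build (PySem.Str.lower a).toList
      (fun c => if 'a' ≤ c ∧ c ≤ 'z'
        then some (Char.ofNat ((PySem.Int.mod ((c.toNat : Int) - 97 + cle) 26 + 97).toNat))
        else none)]
    rw [PySem.List.foldl_append_ite (p := fun c => 'a' ≤ c ∧ c ≤ 'z')
      (f := fun c => Char.ofNat ((PySem.Int.mod ((c.toNat : Int) - 97 + cle) 26 + 97).toNat))]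
    rw [← flatMap_ite, List.nil_append]
    congr 1
    funext c
    by_cases h : 'a' ≤ c ∧ c ≤ 'z' <;> simp [h]
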